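-- pv_equiv track=rewrite | github.com/RascalTwo/DailyProblem | problems/DailyCoding/243/solve.py | group_with_limit
-- ===== SOURCE A (Python) =====
-- from typing import List, Optional
--
-- def group_with_limit(numbers: List[int], limit: int, k: int) -> Optional[List[List[int]]]:
-- 	groups: List[List[int]] = [[]]
-- 	for number in numbers:
-- 		if sum(groups[-1]) + number > limit:
-- 			groups.append([number])
-- 		else:
-- 			groups[-1].append(number)
--
--
-- 	while True:
-- 		group_count = len(groups)
-- 		if group_count == k:
-- 			return groups
--
-- 		for i, group in enumerate(groups):
-- 			if len(group) > 1:
-- 				groups.insert(i, [group.pop(0)])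
-- 				break
-- 		else:
-- 			break
--
--
-- 	return groups if group_count == k else None
-- ===== SOURCE B (Python) =====
-- def group_with_limit(numbers, limit, k):
--     # Single pass: maintain a running sum instead of re-summing the last group.
--     groups, cur, s = [], [], 0
--     for n in numbers:
--         if s + n > limit:
--             groups.append(cur)
--             cur, s = [n], n
--         else:
--             cur.append(n)
--             s += n
--     groups.append(cur)
--     need = k - len(groups)
--     if need == 0:
--         return groups
--     if need < 0:
--         return None
--     # Distribute in one pass: peel front elements off the leading groups
--     # until exactly `need` extra groups have been created.
--     out = []
--     for i, g in enumerate(groups):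
--         if need == 0:
--             out.extend(groups[i:])
--             return out
--         t = min(need, max(len(g) - 1, 0))
--         out.extend([x] for x in g[:t])
--         out.append(g[t:])
--         need -= t
--     return out if need == 0 else None
-- ===== Notes on version B (the rewrite author's own statement) =====
-- stated objective: faster
-- what changed: B keeps a running sum instead of re-summing the last group on every element, and replaces A's repeated scan-insert-pop splitting loop by computing need = k - len(groups) once and distributing front elements of the leading groups in a single pass.
import Mathlib
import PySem

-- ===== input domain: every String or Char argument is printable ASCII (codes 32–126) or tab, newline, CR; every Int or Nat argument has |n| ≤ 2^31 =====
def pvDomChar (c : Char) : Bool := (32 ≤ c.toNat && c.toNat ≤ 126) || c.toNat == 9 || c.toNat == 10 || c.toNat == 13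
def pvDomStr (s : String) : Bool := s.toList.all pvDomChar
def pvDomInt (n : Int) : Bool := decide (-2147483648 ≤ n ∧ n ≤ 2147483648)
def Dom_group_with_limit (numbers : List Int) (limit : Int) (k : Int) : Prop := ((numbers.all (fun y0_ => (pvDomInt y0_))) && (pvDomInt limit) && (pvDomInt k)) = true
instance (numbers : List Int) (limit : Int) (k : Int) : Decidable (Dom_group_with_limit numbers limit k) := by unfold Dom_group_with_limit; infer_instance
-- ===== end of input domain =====

-- B replaces A's quadratic re-summing and repeated front-insert splitting with a
-- running-sum grouping pass and a single-pass distribution of front elements.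

-- ===== PORT A =====
-- A's inner `for i, group in enumerate(groups): if len(group)>1: insert+pop; break`:
-- find the first group with more than one element and split off its head in place.
def splitFirstA : List (List Int) → Option (List (List Int))
  | [] => none
  | g :: rest =>
    match g with
    | a :: b :: t => some ([a] :: (b :: t) :: rest)
    | _ => (splitFirstA rest).map (fun r => g :: r)

def splitMeasureA (gs : List (List Int)) : Nat := (gs.map (fun g => g.length - 1)).sum

theorem splitFirstA_measure : ∀ (gs gs' : List (List Int)), splitFirstA gs = some gs' → splitMeasureA gs' < splitMeasureA gs := by
  intro gs
  induction gs with
  | nil => intro gs' h; simp [splitFirstA] at h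
  | cons g rest ih =>
    intro gs' h
    match g with
    | a :: b :: t =>
      simp [splitFirstA] at h
      subst h
      simp [splitMeasureA, List.map, List.sum_cons]
    | [] =>
      simp [splitFirstA] at h
      obtain ⟨r, hr, rfl⟩ := h
      have := ih r hr
      simp [splitMeasureA, List.map, List.sum_cons] at *
      omega
    | [a] =>
      simp [splitFirstA] at h
      obtain ⟨r, hr, rfl⟩ := h
      have := ih r hr
      simp [splitMeasureA, List.map, List.sum_cons] at *
      omega

-- A's `while True` loop: return when the count reaches k, else split; on the
-- for-loop's `else: break`, return groups if group_count == k else None.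
def loopA (gs : List (List Int)) (k : Int) : Option (List (List Int)) :=
  if (gs.length : Int) = k then some gs
  else
    match h : splitFirstA gs with
    | some gs' => loopA gs' k
    | none => if (gs.length : Int) = k then some gs else none
termination_by splitMeasureA gs
decreasing_by exact splitFirstA_measure _ _ h

def group_with_limit (numbers : List Int) (limit : Int) (k : Int) : Option (List (List Int)) :=
  -- `sum(groups[-1])` re-summed on each step, exactly as A does
  let groups := numbers.foldl (fun gs number =>
    if (gs.getLastD []).sum + number > limit then gs ++ [[number]]
    else gs.dropLast ++ [(gs.getLastD []) ++ [number]]) [[]]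
  loopA groups k

-- ===== PORT B =====
-- B's distribution loop: peel front elements off leading groups until `need`
-- extra groups exist; structural recursion over the group list, same state.
def bDist : List (List Int) → Int → Option (List (List Int))
  | [], need => if need = 0 then some [] else none
  | g :: rest, need =>
    if need = 0 then some (g :: rest)
    else
      let t := min need (max ((g.length : Int) - 1) 0)
      match bDist rest (need - t) with
      | some out => some ((g.take t.toNat).map (fun x => [x]) ++ g.drop t.toNat :: out)
      | none => none

def group_with_limit_alt (numbers : List Int) (limit : Int) (k : Int) : Option (List (List Int)) :=
  let p := numbers.foldl (fun (st : List (List Int) × List Int × Int) n =>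
      if st.2.2 + n > limit then (st.1 ++ [st.2.1], [n], n)
      else (st.1, st.2.1 ++ [n], st.2.2 + n))
    ([], [], 0)
  let gs := p.1 ++ [p.2.1]
  let need := k - gs.length
  if need = 0 then some gs
  else if need < 0 then none
  else bDist gs need

-- ===== PRECONDITION & SPEC =====
def Spec_group_with_limit (numbers : List Int) (limit : Int) (k : Int) (out : Option (List (List Int))) : Prop := out = group_with_limit_alt numbers limit k
instance (numbers : List Int) (limit : Int) (k : Int) (out : Option (List (List Int))) : Decidable (Spec_group_with_limit numbers limit k out) := by unfold Spec_group_with_limit; infer_instance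

-- ===== CLAIM (what is proved, stated in full; the proofs are below) =====
def Claim_equal_group_with_limit : Prop := ∀ (numbers : List Int) (limit : Int) (k : Int), Dom_group_with_limit numbers limit k → Spec_group_with_limit numbers limit k (group_with_limit numbers limit k)

-- ===== LEMMAS AND PROOFS =====

theorem fold_group_eq (limit : Int) (nums : List Int) : ∀ (gs : List (List Int)) (cur : List Int),
    nums.foldl (fun gs number =>
      if (gs.getLastD []).sum + number > limit then gs ++ [[number]]
      else gs.dropLast ++ [(gs.getLastD []) ++ [number]]) (gs ++ [cur]) =
    (let p := nums.foldl (fun (st : List (List Int) × List Int × Int) n =>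
        if st.2.2 + n > limit then (st.1 ++ [st.2.1], [n], n)
        else (st.1, st.2.1 ++ [n], st.2.2 + n)) (gs, cur, cur.sum)
     p.1 ++ [p.2.1]) := by
  induction nums with
  | nil => intro gs cur; simp
  | cons n nums ih =>
    intro gs cur
    simp only [List.foldl_cons, List.getLastD_concat, List.dropLast_concat]
    by_cases h : cur.sum + n > limit
    · rw [if_pos h, if_pos h]
      have := ih (gs ++ [cur]) [n]
      simpa using this
    · rw [if_neg h, if_neg h]
      have := ih gs (cur ++ [n])
      simpa using this

theorem bDist_zero (gs : List (List Int)) : bDist gs 0 = some gs := by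
  cases gs <;> simp [bDist]

theorem bDist_none (gs : List (List Int)) (need : Int) (hall : ∀ g ∈ gs, g.length ≤ 1) (hp : 0 < need) : bDist gs need = none := by
  induction gs with
  | nil => simp [bDist]; omega
  | cons g rest ih =>
    have hg : g.length ≤ 1 := hall g (by simp)
    have ht : min need (max ((g.length : Int) - 1) 0) = 0 := by omega
    rw [bDist]
    simp only [ht]
    rw [if_neg (by omega)]
    simp [ih (fun g hm => hall g (by simp [hm]))]

theorem splitFirstA_none (gs : List (List Int)) : splitFirstA gs = none ↔ ∀ g ∈ gs, g.length ≤ 1 := by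
  induction gs with
  | nil => simp [splitFirstA]
  | cons g rest ih =>
    match g with
    | [] => simp [splitFirstA, ih]
    | [a] => simp [splitFirstA, ih]
    | a :: b :: t => simp [splitFirstA]

theorem splitFirstA_length : ∀ (gs gs' : List (List Int)), splitFirstA gs = some gs' → gs'.length = gs.length + 1 := by
  intro gs
  induction gs with
  | nil => intro gs' h; simp [splitFirstA] at h
  | cons g rest ih =>
    intro gs' h
    match g with
    | a :: b :: t => simp [splitFirstA] at h; subst h; simp
    | [] =>
      simp [splitFirstA] at h
      obtain ⟨r, hr, rfl⟩ := h
      simp [ih r hr]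
    | [a] =>
      simp [splitFirstA] at h
      obtain ⟨r, hr, rfl⟩ := h
      simp [ih r hr]

theorem bDist_split : ∀ (gs gs' : List (List Int)) (need : Int), splitFirstA gs = some gs' → 1 ≤ need → bDist gs need = bDist gs' (need - 1) := by
  intro gs
  induction gs with
  | nil => intro gs' need h _; simp [splitFirstA] at h
  | cons g rest ih =>
    intro gs' need h hn
    match g with
    | a :: b :: t =>
      simp [splitFirstA] at h
      subst h
      have hc : (0:Int) ≤ (t.length : Int) := Int.natCast_nonneg _
      by_cases h1 : need = 1
      · subst h1
        have ht : min (1:Int) (max (((a :: b :: t).length : Int) - 1) 0) = 1 := by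
          simp only [List.length_cons]; push_cast; omega
        simp only [bDist, ht]
        norm_num [bDist_zero]
      · have h2 : (2:Int) ≤ need := by omega
        obtain ⟨t2, ht2def⟩ : ∃ t2 : Int, min (need - 1) ((t.length : Int)) = t2 := ⟨_, rfl⟩
        have ht2nn : 0 ≤ t2 := by omega
        have htp : min need (max (((a :: b :: t).length : Int) - 1) 0) = t2 + 1 := by
          simp only [List.length_cons]; push_cast; omega
        have ht1 : min (need - 1) (max ((([a] : List Int).length : Int) - 1) 0) = 0 := by
          simp; omega
        have ht2 : min (need - 1) (max (((b :: t).length : Int) - 1) 0) = t2 := by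
          simp only [List.length_cons]; push_cast; omega
        have htn : (t2 + 1).toNat = t2.toNat + 1 := by omega
        simp only [bDist, htp, ht1, htn]
        rw [if_neg (by omega), if_neg (by omega), if_neg (by omega)]
        rw [show need - (t2 + 1) = need - 1 - t2 by ring, show need - 1 - 0 = need - 1 by ring]
        rw [ht2]
        cases hout : bDist rest (need - 1 - t2) with
        | none => simp
        | some out => simp [List.take_succ_cons, List.drop_succ_cons]
    | [] =>
      simp [splitFirstA] at h
      obtain ⟨r, hr, rfl⟩ := h
      have ht : min need (max ((([] : List Int).length : Int) - 1) 0) = 0 := by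
        simp; omega
      simp only [bDist, ht]
      rw [if_neg (by omega), show need - 0 = need by ring, ih r need hr hn]
      by_cases h1 : need - 1 = 0
      · rw [h1, bDist_zero]
        norm_num
      · rw [if_neg h1]
        have ht' : min (need - 1) (max ((([] : List Int).length : Int) - 1) 0) = 0 := by
          simp; omega
        simp only [ht']
        rw [show need - 1 - 0 = need - 1 by ring]
    | [a] =>
      simp [splitFirstA] at h
      obtain ⟨r, hr, rfl⟩ := h
      have ht : min need (max ((([a] : List Int).length : Int) - 1) 0) = 0 := by
        simp; omega
      simp only [bDist, ht]
      rw [if_neg (by omega), show need - 0 = need by ring, ih r need hr hn]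
      by_cases h1 : need - 1 = 0
      · rw [h1, bDist_zero]
        norm_num
      · rw [if_neg h1]
        have ht' : min (need - 1) (max ((([a] : List Int).length : Int) - 1) 0) = 0 := by
          simp; omega
        simp only [ht']
        rw [show need - 1 - 0 = need - 1 by ring]

def rhsB (gs : List (List Int)) (k : Int) : Option (List (List Int)) :=
  if k - (gs.length : Int) = 0 then some gs
  else if k - (gs.length : Int) < 0 then none
  else bDist gs (k - gs.length)

theorem loopA_eq_rhsB (k : Int) : ∀ (gs : List (List Int)), loopA gs k = rhsB gs k := by
  suffices h : ∀ (n : Nat) (gs : List (List Int)), splitMeasureA gs < n → loopA gs k = rhsB gs k by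
    intro gs; exact h (splitMeasureA gs + 1) gs (by omega)
  intro n
  induction n with
  | zero => intro gs h; omega
  | succ n ih =>
    intro gs hlt
    rw [loopA]
    by_cases hk : (gs.length : Int) = k
    · rw [if_pos hk]
      unfold rhsB
      rw [if_pos (show k - (gs.length : Int) = 0 by omega)]
    · rw [if_neg hk]
      split
      · -- splitFirstA gs = some gs'
        rename_i gs' heq
        have hm := splitFirstA_measure gs gs' heq
        have hlen := splitFirstA_length gs gs' heq
        rw [ih gs' (by omega)]
        unfold rhsB
        rw [hlen]
        push_cast
        by_cases hneg : k - (gs.length : Int) < 0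
        · rw [if_neg (show ¬(k - ((gs.length : Int) + 1) = 0) by omega),
            if_pos (show k - ((gs.length : Int) + 1) < 0 by omega),
            if_neg (show ¬(k - (gs.length : Int) = 0) by omega),
            if_pos hneg]
        · have hpos : 0 < k - (gs.length : Int) := by omega
          rw [if_neg (show ¬(k - (gs.length : Int) = 0) by omega),
            if_neg (show ¬(k - (gs.length : Int) < 0) by omega),
            bDist_split gs gs' _ heq (by omega)]
          by_cases h0 : k - (gs.length : Int) - 1 = 0
          · rw [if_pos (show k - ((gs.length : Int) + 1) = 0 by omega), h0, bDist_zero]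
          · rw [if_neg (show ¬(k - ((gs.length : Int) + 1) = 0) by omega),
              if_neg (show ¬(k - ((gs.length : Int) + 1) < 0) by omega),
              show k - ((gs.length : Int) + 1) = k - (gs.length : Int) - 1 by ring]
      · -- splitFirstA gs = none
        rename_i heq
        rw [if_neg hk]
        unfold rhsB
        rw [if_neg (show ¬(k - (gs.length : Int) = 0) by omega)]
        by_cases hneg : k - (gs.length : Int) < 0
        · rw [if_pos hneg]
        · rw [if_neg hneg, bDist_none gs _ ((splitFirstA_none gs).mp heq) (by omega)]

-- ===== VERDICT (by name: the statement is the Claim_ definition above) =====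
theorem group_with_limit_spec : Claim_equal_group_with_limit := by
  intro numbers limit k _
  show group_with_limit numbers limit k = group_with_limit_alt numbers limit k
  unfold group_with_limit group_with_limit_alt
  have h := fold_group_eq limit numbers [] []
  simp only [List.nil_append, List.sum_nil] at h
  rw [h, loopA_eq_rhsB]
  unfold rhsB
  split_ifs with h1 h2 <;> simp_all
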